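-- pv_equiv track=rewrite | github.com/rmbryan71/rosalind | solution-code/drafts/lexv.py | lexv
-- ===== SOURCE A (Python) =====
-- def lexv(A, n):
--     A = A[::-1]
--     stack = [(letter,) for letter in A]
--
--     while stack:
--         string = stack.pop()
--         yield ''.join(string)
--         if len(string) != n:
--             for letter in A:
--                 stack.append((*string, letter))
-- ===== SOURCE B (Python) =====
-- def lexv(A, n):
--     def rec(prefix):
--         yield ''.join(prefix)
--         if len(prefix) != n:
--             for letter in A:
--                 yield from rec(prefix + (letter,))
--     for letter in A:
--         yield from rec((letter,))
-- ===== Notes on version B (the rewrite author's own statement) =====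
-- stated objective: simpler
-- what changed: Replaces A's explicit stack over the reversed alphabet with a direct recursive generator over prefixes in the original alphabet order, yielding the same pre-order traversal of the prefix tree.
import Mathlib
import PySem

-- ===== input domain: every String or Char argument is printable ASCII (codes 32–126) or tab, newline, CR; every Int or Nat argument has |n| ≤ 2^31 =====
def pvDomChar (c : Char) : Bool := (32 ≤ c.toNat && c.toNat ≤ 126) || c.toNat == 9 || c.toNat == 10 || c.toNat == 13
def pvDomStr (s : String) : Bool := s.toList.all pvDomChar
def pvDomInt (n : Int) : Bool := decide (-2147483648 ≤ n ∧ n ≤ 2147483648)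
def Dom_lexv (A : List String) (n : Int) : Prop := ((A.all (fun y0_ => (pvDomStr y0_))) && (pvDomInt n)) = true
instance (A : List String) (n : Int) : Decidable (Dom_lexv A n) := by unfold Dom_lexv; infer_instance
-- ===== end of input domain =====

-- B replaces A's explicit-stack DFS over the reversed alphabet by a direct recursive
-- generator over pfxes; same output sequence, simpler decomposition.

-- ===== PORT A =====
-- Termination measure for A's stack loop: each stack entry s (a tuple of letters,
-- with s.length ≤ n by invariant) accounts for b^(n - len s) where b = |alphabet|+1.
def pvMeasureA (b : ℕ) (n : Int) (stack : List (List String)) : ℕ :=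
  (stack.map (fun s => b ^ ((n - s.length).toNat))).sum

theorem pvMeasureA_pop (b : ℕ) (n : Int) (s : List String) (rest : List (List String))
    (hb : 1 ≤ b) : pvMeasureA b n rest < pvMeasureA b n (s :: rest) := by
  have hpos : 0 < b ^ ((n - (s.length:Int)).toNat) := Nat.pow_pos hb
  simp only [pvMeasureA, List.map_cons, List.sum_cons]
  omega

theorem pvMeasureA_push (Arev : List String) (n : Int) (s : List String)
    (rest : List (List String)) (hlt : (s.length : Int) < n) :
    pvMeasureA (Arev.length + 1) n ((Arev.map (fun letter => s ++ [letter])).reverse ++ rest)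
      < pvMeasureA (Arev.length + 1) n (s :: rest) := by
  set b := Arev.length + 1 with hbdef
  have hk : (n - (s.length + 1)).toNat + 1 = (n - s.length).toNat := by omega
  have hchild : ((Arev.map (fun letter => s ++ [letter])).reverse.map
      (fun t => b ^ ((n - t.length).toNat))).sum
      = Arev.length * b ^ ((n - (s.length + 1)).toNat) := by
    rw [List.map_reverse, List.sum_reverse, List.map_map]
    have : ((fun t => b ^ ((n - (List.length t : Int)).toNat)) ∘ fun letter => s ++ [letter])
        = fun (_ : String) => b ^ ((n - ((s.length : Int) + 1)).toNat) := by
      funext l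
      simp only [Function.comp_def, List.length_append, List.length_cons, List.length_nil]
      norm_num
    rw [this, List.map_const', List.sum_replicate, smul_eq_mul]
  have hpos : 0 < b ^ ((n - (s.length + 1)).toNat) := Nat.pow_pos (by omega)
  have hlt2 : Arev.length * b ^ ((n - (s.length + 1)).toNat) < b ^ ((n - s.length).toNat) := by
    rw [← hk, pow_succ]
    calc Arev.length * b ^ ((n - (s.length + 1)).toNat)
        < b * b ^ ((n - (s.length + 1)).toNat) :=
          Nat.mul_lt_mul_of_lt_of_le (by omega) (le_refl _) hpos
      _ = b ^ ((n - (s.length + 1)).toNat) * b := by ring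
  simp only [pvMeasureA, List.map_append, List.sum_append, List.map_cons, List.sum_cons, hchild]
  omega

-- Literal port of A's while-loop. The head of `stack` is the TOP of Python's stack
-- (Python appends/pops at the right end, so Python's stack list is our list reversed);
-- hence `stack.pop()` = head, and the `for letter in Arev: append` loop prepends the
-- reversed block of children. The invariant `len s ≤ n` (true for every reachable
-- stack, since pushes happen only when len ≠ n) is carried only for termination.
def pvLoopA (Arev : List String) (n : Int) :
    (stack : List (List String)) → (∀ s ∈ stack, (s.length : Int) ≤ n) → List String
  | [], _ => []
  | string :: rest, h =>
    String.join string ::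
      (if hne : (string.length : Int) ≠ n then
        pvLoopA Arev n ((Arev.map (fun letter => string ++ [letter])).reverse ++ rest)
          (by
            intro s hs
            rcases List.mem_append.1 hs with hs | hs
            · rcases List.mem_map.1 (List.mem_reverse.1 hs) with ⟨l, _, rfl⟩
              have hle := h string (List.mem_cons_self)
              simp only [List.length_append, List.length_cons, List.length_nil]
              push_cast
              omega
            · exact h s (List.mem_cons_of_mem _ hs))
      else pvLoopA Arev n rest (fun s hs => h s (List.mem_cons_of_mem _ hs)))
termination_by stack _ => pvMeasureA (Arev.length + 1) n stack
decreasing_by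
  · have := pvMeasureA_push Arev n string rest
      (lt_of_le_of_ne (h string List.mem_cons_self) hne)
    simpa using this
  · exact pvMeasureA_pop _ n string rest (by omega)

-- port of A: A = A[::-1]; stack = [(letter,) for letter in A]; while stack: pop/yield/push.
-- The dite on 1 ≤ n only makes the function total: for n < 1 with A ≠ [] the Python
-- generator never terminates (no finite value exists there); both ports take the same
-- guard, and for A = [] or 1 ≤ n the Python loop terminates and is ported literally.
def lexv (A : List String) (n : Int) : List String :=
  -- A = A[::-1] is `A.reverse` (used for the initial stack and inside the loop)
  if hn : 1 ≤ n then
    pvLoopA A.reverse n ((A.reverse.map (fun letter => [letter])).reverse)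
      (by
        intro s hs
        rcases List.mem_map.1 (List.mem_reverse.1 hs) with ⟨l, _, rfl⟩
        simpa using hn)
  else []

-- ===== PORT B =====
-- rec(pfx): yield ''.join(pfx); if len(pfx) != n: for letter in A: yield from rec(pfx+(letter,))
-- The length invariant is carried only for termination (B's generator likewise never
-- reaches a pfx longer than n when started from single letters with 1 ≤ n). B's
-- generator likewise has no finite value when n < 1 and A ≠ []; same dite guard below.
def pvRecB (A : List String) (n : Int) (pfx : List String)
    (h : (pfx.length : Int) ≤ n) : List String :=
  String.join pfx ::
    (if hne : (pfx.length : Int) ≠ n then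
      A.flatMap (fun letter =>
        pvRecB A n (pfx ++ [letter])
          (by simp only [List.length_append, List.length_singleton]; push_cast; omega))
    else [])
termination_by (n - pfx.length).toNat
decreasing_by simp only [List.length_append, List.length_singleton]; push_cast; omega

-- port of B: for letter in A: yield from rec((letter,))
def lexv_alt (A : List String) (n : Int) : List String :=
  if hn : 1 ≤ n then
    A.flatMap (fun letter => pvRecB A n [letter] (by simpa using hn))
  else []

-- ===== PRECONDITION & SPEC =====
def Spec_lexv (A : List String) (n : Int) (out : List String) : Prop := out = lexv_alt A n
instance (A : List String) (n : Int) (out : List String) : Decidable (Spec_lexv A n out) := by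
  unfold Spec_lexv; infer_instance

-- ===== CLAIM (what is proved, stated in full; the proofs are below) =====
def Claim_equal_lexv : Prop :=
  ∀ (A : List String) (n : Int), Dom_lexv A n → Spec_lexv A n (lexv A n)

-- ===== LEMMAS AND PROOFS =====

-- Proof-irrelevant wrapper for B's recursion, used to state the loop invariant.
def pvRecB' (A : List String) (n : Int) (s : List String) : List String :=
  if hs : (s.length : Int) ≤ n then pvRecB A n s hs else []

theorem pvRecB'_eq (A : List String) (n : Int) (s : List String)
    (hs : (s.length : Int) ≤ n) :
    pvRecB' A n s = String.join s ::
      (if (s.length : Int) ≠ n then A.flatMap (fun l => pvRecB' A n (s ++ [l])) else []) := by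
  rw [pvRecB', dif_pos hs, pvRecB]
  split_ifs with hne
  · congr 1
    apply List.flatMap_congr
    intro l _
    rw [pvRecB', dif_pos (show (((s ++ [l]).length : Int) ≤ n) by
      simp only [List.length_append, List.length_singleton]; push_cast; omega)]
  · rfl

theorem pvLoopA_eq_flatMap (A : List String) (n : Int) (m : ℕ) :
    ∀ (stack : List (List String)) (h : ∀ s ∈ stack, (s.length : Int) ≤ n),
      pvMeasureA (A.reverse.length + 1) n stack ≤ m →
      pvLoopA A.reverse n stack h = stack.flatMap (pvRecB' A n) := by
  induction m with
  | zero =>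
    intro stack h hm
    cases stack with
    | nil => rw [pvLoopA]; rfl
    | cons s rest =>
      exfalso
      have : 0 < (A.reverse.length + 1) ^ ((n - (s.length : Int)).toNat) :=
        Nat.pow_pos (by omega)
      simp only [pvMeasureA, List.map_cons, List.sum_cons] at hm
      omega
  | succ m ih =>
    intro stack h hm
    cases stack with
    | nil => rw [pvLoopA]; rfl
    | cons s rest =>
      have hs : (s.length : Int) ≤ n := h s List.mem_cons_self
      rw [pvLoopA, List.flatMap_cons, pvRecB'_eq A n s hs]
      split_ifs with hne
      · have hlt : (s.length : Int) < n := lt_of_le_of_ne hs hne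
        have hmeas := pvMeasureA_push A.reverse n s rest hlt
        rw [ih _ _ (by omega)]
        simp only [List.flatMap_append, List.map_reverse, List.reverse_reverse,
          List.flatMap_map, List.cons_append]
      · have hmeas := pvMeasureA_pop (A.reverse.length + 1) n s rest (by omega)
        rw [ih _ _ (by omega)]
        simp

theorem lexv_eq_alt (A : List String) (n : Int) :
    lexv A n = lexv_alt A n := by
  by_cases hn : 1 ≤ n
  · rw [lexv, dif_pos hn, lexv_alt, dif_pos hn,
      pvLoopA_eq_flatMap A n (pvMeasureA (A.reverse.length + 1) n
        ((A.reverse.map (fun letter => [letter])).reverse)) _ _ (le_refl _)]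
    simp only [List.map_reverse, List.reverse_reverse, List.flatMap_map]
    apply List.flatMap_congr
    intro l _
    rw [pvRecB', dif_pos (show (([l] : List String).length : Int) ≤ n by simpa using hn)]
  · rw [lexv, dif_neg hn, lexv_alt, dif_neg hn]

theorem lexv_spec : Claim_equal_lexv := by
  intro A n _
  unfold Spec_lexv
  exact lexv_eq_alt A n
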